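-- pv_equiv track=rewrite | github.com/ericmerle3789/Collatz-Junction-Theorem | scripts/exploration/phase_b1_energy_E8.py | compute_E4_brute
-- ===== SOURCE A (Python) =====
-- from collections import Counter
--
-- def compute_E4_brute(p, m):
--     """E₄ par double boucle (référence pour cross-validation)."""
--     elements = []
--     h = 1
--     for j in range(m):
--         elements.append(h % p)
--         h = (h * 2) % p
--     sums = Counter()
--     for a in elements:
--         for b in elements:
--             sums[(a + b) % p] += 1
--     return sum(v * v for v in sums.values())
-- ===== SOURCE B (Python) =====
-- def compute_E4_brute(p, m):
--     """E4 via the autocorrelation identity sum_t C(t)^2 = sum_d g(d)^2: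
--     g(d) counts ordered pairs of sequence elements whose DIFFERENCE is d mod p,
--     computed over distinct residues weighted by their frequencies."""
--     freq = {}
--     h = 1
--     for _ in range(m):
--         r = h % p
--         freq[r] = freq.get(r, 0) + 1
--         h = h * 2 % p
--     diffs = {}
--     for a, ca in freq.items():
--         for c, cc in freq.items():
--             d = (a - c) % p
--             diffs[d] = diffs.get(d, 0) + ca * cc
--     total = 0
--     for g in diffs.values():
--         total += g * g
--     return total
-- ===== Notes on version B (the rewrite author's own statement) =====
-- stated objective: faster
-- what changed: B never forms the pair-sum distribution A builds over all m^2 element pairs: it tallies residue frequencies once and uses the autocorrelation identity sum_t C(t)^2 = sum_d g(d)^2, computing g (counts of residue DIFFERENCES, weighted by frequencies) over the at most k distinct residues, so the quadratic work is k^2 instead of m^2.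
import Mathlib
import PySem

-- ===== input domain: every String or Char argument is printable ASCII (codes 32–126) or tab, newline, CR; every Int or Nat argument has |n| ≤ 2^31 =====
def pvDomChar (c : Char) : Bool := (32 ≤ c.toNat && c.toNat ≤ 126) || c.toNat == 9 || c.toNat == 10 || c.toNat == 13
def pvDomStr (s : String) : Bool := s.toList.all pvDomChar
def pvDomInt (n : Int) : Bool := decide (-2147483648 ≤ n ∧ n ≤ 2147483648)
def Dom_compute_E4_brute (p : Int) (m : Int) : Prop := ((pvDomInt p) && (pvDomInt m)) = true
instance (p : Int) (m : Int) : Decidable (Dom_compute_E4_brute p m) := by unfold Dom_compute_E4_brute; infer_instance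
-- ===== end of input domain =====

-- B never forms the pair-sum distribution A builds over all m^2 element pairs: it tallies
-- residue frequencies once and uses the autocorrelation identity Σ_t C(t)² = Σ_d g(d)²,
-- computing g (counts of weighted residue DIFFERENCES) over the distinct residues only
-- (objective: faster when m exceeds the number of distinct residues).

-- ===== PORT A =====
def compute_E4_brute (p : Int) (m : Int) : Int :=
  -- elements = []; h = 1; for j in range(m): elements.append(h % p); h = (h*2) % p
  let st := (PySem.List.pyRange 0 m 1).foldl
      (fun (st : List Int × Int) _ =>
        (st.1 ++ [PySem.Int.mod st.2 p], PySem.Int.mod (st.2 * 2) p)) ([], 1)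
  let elements := st.1
  -- sums = Counter(); for a in elements: for b in elements: sums[(a+b)%p] += 1
  let sums := elements.foldl
      (fun d a => elements.foldl
        (fun (d : PySem.Dict Int Int) b => d.modify (PySem.Int.mod (a + b) p) 0 (· + 1)) d)
      PySem.Dict.empty
  -- return sum(v*v for v in sums.values())
  sums.values.foldl (fun acc v => acc + v * v) 0

-- ===== PORT B =====
def compute_E4_brute_alt (p : Int) (m : Int) : Int :=
  -- freq = {}; h = 1
  -- for _ in range(m): r = h % p; freq[r] = freq.get(r, 0) + 1; h = h * 2 % p
  let st := (PySem.List.pyRange 0 m 1).foldl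
      (fun (st : PySem.Dict Int Int × Int) _ =>
        let r := PySem.Int.mod st.2 p
        (st.1.insert r (st.1.getD r 0 + 1), PySem.Int.mod (st.2 * 2) p))
      (PySem.Dict.empty, 1)
  let freq := st.1
  -- diffs = {}
  -- for a, ca in freq.items():
  --   for c, cc in freq.items():
  --     d = (a - c) % p; diffs[d] = diffs.get(d, 0) + ca * cc
  let diffs := freq.items.foldl
      (fun dd ac => freq.items.foldl
        (fun (dd : PySem.Dict Int Int) cc =>
          let d := PySem.Int.mod (ac.1 - cc.1) p
          dd.insert d (dd.getD d 0 + ac.2 * cc.2)) dd)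
      PySem.Dict.empty
  -- total = 0; for g in diffs.values(): total += g * g; return total
  diffs.values.foldl (fun total g => total + g * g) 0

-- ===== PRECONDITION & SPEC =====
-- Python A raises ZeroDivisionError on 'h % p' when p = 0 and the loop body runs (m > 0).
def Pre_compute_E4_brute (p : Int) (m : Int) : Prop := p ≠ 0 ∨ m ≤ 0
instance (p : Int) (m : Int) : Decidable (Pre_compute_E4_brute p m) := by
  unfold Pre_compute_E4_brute; infer_instance
def pvWitness_compute_E4_brute : Int × Int := (7, 12)

def Spec_compute_E4_brute (p : Int) (m : Int) (out : Int) : Prop := out = compute_E4_brute_alt p m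
instance (p : Int) (m : Int) (out : Int) : Decidable (Spec_compute_E4_brute p m out) := by
  unfold Spec_compute_E4_brute; infer_instance

-- ===== CLAIM (what is proved, stated in full; the proofs are below) =====
def Claim_equal_compute_E4_brute : Prop := ∀ (p : Int) (m : Int), Dom_compute_E4_brute p m → Pre_compute_E4_brute p m → Spec_compute_E4_brute p m (compute_E4_brute p m)

-- ===== LEMMAS AND PROOFS =====

-- Python's 'd[k] = d.get(k, 0) + w' is exactly 'd.modify k 0 (· + w)' (definitional)
theorem insert_getD_eq_modify (d : PySem.Dict Int Int) (k w : Int) :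
    d.insert k (d.getD k 0 + w) = d.modify k 0 (· + w) := rfl

-- B's first loop maintains exactly the Counter of the element list A's first loop builds.
theorem loop1_eq (p : Int) (L : List Int) (es : List Int) (h : Int) :
    (L.foldl (fun (st : PySem.Dict Int Int × Int) _ =>
        (st.1.modify (PySem.Int.mod st.2 p) 0 (· + 1), PySem.Int.mod (st.2 * 2) p))
      (PySem.Dict.counter es, h)).1
      = PySem.Dict.counter
          ((L.foldl (fun (st : List Int × Int) _ =>
              (st.1 ++ [PySem.Int.mod st.2 p], PySem.Int.mod (st.2 * 2) p)) (es, h)).1) := by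
  induction L generalizing es h with
  | nil => rfl
  | cons x L ih =>
      simp only [List.foldl_cons]
      rw [← PySem.Dict.counter_append_singleton, ih]

-- nested modify-loops flatten to one loop over the flatMap of (key, weight) pairs
theorem foldl_nested_modify {α β : Type} (xs : List α) (ys : List β)
    (key : α → β → Int) (w : α → β → Int) (d : PySem.Dict Int Int) :
    xs.foldl (fun d a => ys.foldl
        (fun (d : PySem.Dict Int Int) b => d.modify (key a b) 0 (· + w a b)) d) d
      = (xs.flatMap (fun a => ys.map (fun b => (key a b, w a b)))).foldl
          (fun d x => d.modify x.1 0 (· + x.2)) d := by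
  induction xs generalizing d with
  | nil => rfl
  | cons a xs ih =>
      simp only [List.foldl_cons, List.flatMap_cons, List.foldl_append]
      rw [ih, List.foldl_map]

-- value at k of a weighted-counter loop
theorem getD_wfold (L : List (Int × Int)) (d : PySem.Dict Int Int) (k : Int) :
    (L.foldl (fun d x => d.modify x.1 0 (· + x.2)) d).getD k 0
      = d.getD k 0 + ((L.filter (fun x => x.1 == k)).map (·.2)).sum := by
  induction L generalizing d with
  | nil => simp
  | cons x L ih =>
      simp only [List.foldl_cons]
      rw [ih, PySem.Dict.getD_modify]
      by_cases h : x.1 = k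
      · simp [h]; ring
      · simp [h, Ne.symm h]

theorem filter_map_sum_eq (L : List (Int × Int)) (k : Int) :
    ((L.filter (fun x => x.1 == k)).map (·.2)).sum
      = (L.map (fun x => if x.1 = k then x.2 else 0)).sum := by
  induction L with
  | nil => rfl
  | cons x L ih => by_cases h : x.1 = k <;> simp [h, ih]

theorem sum_map_flatMap {α β : Type} (L : List α) (g : α → List β) (F : β → Int) :
    ((L.flatMap g).map F).sum = (L.map (fun a => ((g a).map F).sum)).sum := by
  rw [List.map_flatMap, List.flatMap_def, List.sum_flatten, List.map_map]
  rfl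

-- a weighted-counter loop's Σ v*v depends only on the (key,weight) list, through
-- key membership and per-key weight sums
theorem wfold_sumsq (L : List (Int × Int)) :
    ((L.foldl (fun (d : PySem.Dict Int Int) x => d.modify x.1 0 (· + x.2)) PySem.Dict.empty).values.foldl
        (fun acc v => acc + v * v) 0)
      = ((PySem.Set.ofList (L.map (·.1))).map
          (fun k => (((L.filter (fun x => x.1 == k)).map (·.2)).sum) *
                    (((L.filter (fun x => x.1 == k)).map (·.2)).sum))).sum := by
  set d := L.foldl (fun (d : PySem.Dict Int Int) x => d.modify x.1 0 (· + x.2)) PySem.Dict.empty with hd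
  have hkeys : d.keys = PySem.Set.ofList (L.map (·.1)) := by
    rw [hd, PySem.Dict.keys_foldl_modify_key L (·.1) 0 (fun _ x => (· + x.2)),
        PySem.Dict.keys_empty]
    rfl
  have hnd : d.keys.Nodup := by
    rw [hkeys]; exact PySem.Set.nodup_ofList _
  rw [PySem.List.foldl_add d.values (fun v => v * v) 0,
      PySem.Dict.values_eq_map_keys d hnd 0, List.map_map, hkeys]
  simp only [zero_add, Function.comp_def]
  congr 1
  refine List.map_congr_left (fun k _ => ?_)
  rw [hd, getD_wfold, PySem.Dict.getD_empty, zero_add]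

-- multiply a constant into a list sum
theorem sum_map_mul_left_int {α : Type} (L : List α) (b : Int) (f : α → Int) :
    (L.map (fun x => b * f x)).sum = b * (L.map f).sum := by
  induction L with
  | nil => simp
  | cons x L ih => simp [ih, mul_add]

-- Σ over a nodup list of 'if a = k then f k else 0' collapses to f a
theorem sum_map_ite_mem (S : List Int) (a : Int) (f : Int → Int)
    (hnd : S.Nodup) (ha : a ∈ S) :
    (S.map (fun k => if a = k then f k else 0)).sum = f a := by
  induction S with
  | nil => cases ha
  | cons s S ih =>
      rcases List.mem_cons.1 ha with rfl | hmem
      · have : ∀ k ∈ S, (if a = k then f k else 0) = 0 := by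
          intro k hk
          have : a ≠ k := fun h => (List.nodup_cons.1 hnd).1 (h ▸ hk)
          simp [this]
        simp [List.map_congr_left this]
      · have hne : a ≠ s := fun h => (List.nodup_cons.1 hnd).1 (h ▸ hmem)
        simp [hne, ih (List.nodup_cons.1 hnd).2 hmem]

-- grouping a weighted list sum by key
theorem key_group (L : List (Int × Int)) (φ : Int → Int) :
    (L.map (fun x => x.2 * φ x.1)).sum
      = ((PySem.Set.ofList (L.map (·.1))).map
          (fun k => (((L.filter (fun x => x.1 == k)).map (·.2)).sum) * φ k)).sum := by
  induction L using List.reverseRecOn with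
  | nil => rfl
  | append_singleton L x ih =>
      have hsplit : ∀ k : Int, (((L ++ [x]).filter (fun y => y.1 == k)).map (·.2)).sum
          = ((L.filter (fun y => y.1 == k)).map (·.2)).sum + (if x.1 = k then x.2 else 0) := by
        intro k; rw [List.filter_append]
        by_cases h : x.1 = k <;> simp [h]
      rw [List.map_append, List.map_append, List.sum_append, ih]
      simp only [List.map_cons, List.map_nil, List.sum_cons, List.sum_nil, add_zero]
      rw [PySem.Set.ofList_append_singleton]
      simp only [hsplit]
      by_cases hx : x.1 ∈ PySem.Set.ofList (L.map (·.1))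
      · rw [PySem.Set.add_of_mem hx]
        have hdist : ∀ k ∈ PySem.Set.ofList (L.map (·.1)),
            (((L.filter (fun x => x.1 == k)).map (·.2)).sum + (if x.1 = k then x.2 else 0)) * φ k
            = ((L.filter (fun x => x.1 == k)).map (·.2)).sum * φ k + (if x.1 = k then x.2 * φ k else 0) := by
          intro k _; by_cases h : x.1 = k <;> simp [h, add_mul]
        rw [List.map_congr_left hdist, PySem.List.sum_map_add_int,
            sum_map_ite_mem _ _ _ (PySem.Set.nodup_ofList _) hx]
      · rw [PySem.Set.add_of_not_mem hx, List.map_append, List.sum_append]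
        have hxk : x.1 ∉ L.map (·.1) := fun h => hx ((PySem.Set.mem_ofList _ _).mpr h)
        have hsame : ∀ k ∈ PySem.Set.ofList (L.map (·.1)),
            (((L.filter (fun x => x.1 == k)).map (·.2)).sum + (if x.1 = k then x.2 else 0)) * φ k
            = ((L.filter (fun x => x.1 == k)).map (·.2)).sum * φ k := by
          intro k hk
          have : x.1 ≠ k := fun h => hx (h ▸ hk)
          simp [this]
        rw [List.map_congr_left hsame]
        have hflt : L.filter (fun y => y.1 == x.1) = [] := by
          rw [List.filter_eq_nil_iff]
          intro y hy hbe
          exact hxk (List.mem_map.mpr ⟨y, hy, by simpa using hbe⟩)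
        simp [hflt]

-- Σ_k W(k)² over distinct keys = Σ over ordered pairs of entries with equal keys
theorem SQ_to_PS (L : List (Int × Int)) :
    ((PySem.Set.ofList (L.map (·.1))).map
        (fun k => (((L.filter (fun x => x.1 == k)).map (·.2)).sum) *
                  (((L.filter (fun x => x.1 == k)).map (·.2)).sum))).sum
      = (L.map (fun x => (L.map (fun y => if x.1 = y.1 then x.2 * y.2 else 0)).sum)).sum := by
  rw [← key_group L (fun k => ((L.filter (fun x => x.1 == k)).map (·.2)).sum)]
  refine congrArg List.sum (List.map_congr_left (fun x _ => ?_))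
  rw [filter_map_sum_eq, ← sum_map_mul_left_int]
  refine congrArg List.sum (List.map_congr_left (fun y _ => ?_))
  by_cases h : x.1 = y.1
  · rw [if_pos (Eq.symm h), if_pos h]
  · rw [if_neg (fun hh => h (Eq.symm hh)), if_neg h, mul_zero]

theorem mod_zero_self (x : Int) : PySem.Int.mod x 0 = x := by
  have := PySem.Int.floordiv_mul_add_mod x 0; linarith

theorem mod_congr (p x y : Int) : PySem.Int.mod x p = PySem.Int.mod y p ↔ p ∣ (x - y) := by
  by_cases hp : p = 0
  · subst hp; simp [mod_zero_self, sub_eq_zero]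
  constructor
  · intro h
    have hx := PySem.Int.floordiv_mul_add_mod x p
    have hy := PySem.Int.floordiv_mul_add_mod y p
    exact ⟨PySem.Int.floordiv x p - PySem.Int.floordiv y p, by rw [mul_comm] at hx hy ⊢; linarith⟩
  · intro h
    have hd : p ∣ (PySem.Int.mod x p - PySem.Int.mod y p) := by
      have hx := PySem.Int.floordiv_mul_add_mod x p
      have hy := PySem.Int.floordiv_mul_add_mod y p
      obtain ⟨c, hc⟩ := h
      exact ⟨c - PySem.Int.floordiv x p + PySem.Int.floordiv y p, by
        rw [mul_comm] at hx hy; ring_nf; ring_nf at hc hx hy; linarith⟩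
    have hb : |PySem.Int.mod x p - PySem.Int.mod y p| < |p| := by
      rcases lt_or_gt_of_ne hp with hneg | hpos
      · have b1 := PySem.Int.mod_neg_bounds x hneg
        have b2 := PySem.Int.mod_neg_bounds y hneg
        rw [abs_of_neg hneg, abs_lt]; omega
      · have b1 := PySem.Int.mod_nonneg x hpos
        have b2 := PySem.Int.mod_nonneg y hpos
        have c1 := PySem.Int.mod_lt x hpos
        have c2 := PySem.Int.mod_lt y hpos
        rw [abs_of_pos hpos, abs_lt]; omega
    have := Int.eq_zero_of_abs_lt_dvd ((abs_dvd p _).mpr hd) hb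
    omega

-- the sum-collision condition is the difference-collision condition
theorem mod_cond (p a b c d : Int) :
    (PySem.Int.mod (a + b) p = PySem.Int.mod (c + d) p)
      ↔ (PySem.Int.mod (a - c) p = PySem.Int.mod (d - b) p) := by
  rw [mod_congr, mod_congr]
  constructor <;> intro ⟨k, hk⟩ <;> exact ⟨k, by linarith⟩

-- list sum over E as a Finset sum over its distinct values, weighted by counts
theorem list_sum_by_count (E : List Int) (G : Int → Int) :
    (E.map G).sum = ∑ r ∈ E.toFinset, (E.count r : Int) * G r := by
  rw [Finset.sum_list_map_count]; simp

-- sum over the PySem.Set of E as a Finset sum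
theorem set_sum_to_finset (E : List Int) (G : Int → Int) :
    ((PySem.Set.ofList E).map G).sum = ∑ r ∈ E.toFinset, G r := by
  rw [← List.sum_toFinset G (PySem.Set.nodup_ofList E)]
  apply Finset.sum_congr _ (fun _ _ => rfl)
  ext x; simp [PySem.Set.mem_ofList]

-- reorder a fourfold sum: pull the second summation innermost
theorem swap_bcd (F : Finset Int) (h : Int → Int → Int → Int → Int) :
    (∑ a ∈ F, ∑ b ∈ F, ∑ c ∈ F, ∑ d ∈ F, h a b c d)
      = ∑ a ∈ F, ∑ c ∈ F, ∑ d ∈ F, ∑ b ∈ F, h a b c d := by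
  refine Finset.sum_congr rfl (fun a _ => ?_)
  rw [Finset.sum_comm]
  refine Finset.sum_congr rfl (fun c _ => ?_)
  rw [Finset.sum_comm]

-- the ordered-pairs-with-equal-keys sum of a product list, as a quadruple sum
theorem PS_flatMap {α : Type} (E : List α) (K w : α → α → Int) :
    ((E.flatMap (fun a => E.map (fun b => (K a b, w a b)))).map
        (fun x => ((E.flatMap (fun a => E.map (fun b => (K a b, w a b)))).map
          (fun y => if x.1 = y.1 then x.2 * y.2 else 0)).sum)).sum
      = (E.map (fun a => (E.map (fun b => (E.map (fun c => (E.map (fun d =>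
          if K a b = K c d then w a b * w c d else 0)).sum)).sum)).sum)).sum := by
  rw [sum_map_flatMap]
  refine congrArg List.sum (List.map_congr_left (fun a _ => ?_))
  rw [List.map_map]
  refine congrArg List.sum (List.map_congr_left (fun b _ => ?_))
  show ((E.flatMap _).map _).sum = _
  rw [sum_map_flatMap]
  refine congrArg List.sum (List.map_congr_left (fun c _ => ?_))
  rw [List.map_map]
  rfl

-- a fourfold list sum over E as a fourfold Finset sum weighted by counts
theorem quad_to_finset (E : List Int) (g : Int → Int → Int → Int → Int) :
    (E.map (fun a => (E.map (fun b => (E.map (fun c => (E.map (fun d =>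
        g a b c d)).sum)).sum)).sum)).sum
      = ∑ a ∈ E.toFinset, ∑ b ∈ E.toFinset, ∑ c ∈ E.toFinset, ∑ d ∈ E.toFinset,
          (E.count a : Int) * ((E.count b : Int) * ((E.count c : Int) * ((E.count d : Int) * g a b c d))) := by
  rw [list_sum_by_count]
  refine Finset.sum_congr rfl (fun a _ => ?_)
  rw [list_sum_by_count, Finset.mul_sum]
  refine Finset.sum_congr rfl (fun b _ => ?_)
  rw [list_sum_by_count, Finset.mul_sum, Finset.mul_sum]
  refine Finset.sum_congr rfl (fun c _ => ?_)
  rw [list_sum_by_count, Finset.mul_sum, Finset.mul_sum, Finset.mul_sum]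

-- a fourfold sum over the items of Counter(E) as a fourfold Finset sum
theorem quadB_to_finset (E : List Int) (g : (Int × Int) → (Int × Int) → (Int × Int) → (Int × Int) → Int) :
    (((PySem.Set.ofList E).map (fun k => (k, (E.count k : Int)))).map (fun a =>
      (((PySem.Set.ofList E).map (fun k => (k, (E.count k : Int)))).map (fun b =>
        (((PySem.Set.ofList E).map (fun k => (k, (E.count k : Int)))).map (fun c =>
          (((PySem.Set.ofList E).map (fun k => (k, (E.count k : Int)))).map (fun d =>
            g a b c d)).sum)).sum)).sum)).sum
      = ∑ a ∈ E.toFinset, ∑ b ∈ E.toFinset, ∑ c ∈ E.toFinset, ∑ d ∈ E.toFinset,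
          g (a, (E.count a : Int)) (b, (E.count b : Int)) (c, (E.count c : Int)) (d, (E.count d : Int)) := by
  rw [List.map_map, set_sum_to_finset]
  refine Finset.sum_congr rfl (fun a _ => ?_)
  show (((PySem.Set.ofList E).map _).map _).sum = _
  rw [List.map_map, set_sum_to_finset]
  refine Finset.sum_congr rfl (fun b _ => ?_)
  show (((PySem.Set.ofList E).map _).map _).sum = _
  rw [List.map_map, set_sum_to_finset]
  refine Finset.sum_congr rfl (fun c _ => ?_)
  show (((PySem.Set.ofList E).map _).map _).sum = _
  rw [List.map_map, set_sum_to_finset]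
  refine Finset.sum_congr rfl (fun d _ => rfl)

-- ===== VERDICT (by name: the statement is the Claim_ definition above) =====
theorem compute_E4_brute_spec : Claim_equal_compute_E4_brute := by
  intro p m _ _
  unfold Spec_compute_E4_brute compute_E4_brute compute_E4_brute_alt
  simp only [insert_getD_eq_modify]
  set E := ((PySem.List.pyRange 0 m 1).foldl
      (fun (st : List Int × Int) _ =>
        (st.1 ++ [PySem.Int.mod st.2 p], PySem.Int.mod (st.2 * 2) p)) ([], 1)).1 with hE
  have hcnt : ((PySem.List.pyRange 0 m 1).foldl
      (fun (st : PySem.Dict Int Int × Int) _ =>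
        (st.1.modify (PySem.Int.mod st.2 p) 0 (· + 1), PySem.Int.mod (st.2 * 2) p))
      (PySem.Dict.empty, 1)).1 = PySem.Dict.counter E := by
    have := loop1_eq p (PySem.List.pyRange 0 m 1) [] 1
    simpa using this
  simp only [hcnt]
  rw [foldl_nested_modify E E (fun a b => PySem.Int.mod (a + b) p) (fun _ _ => 1),
      foldl_nested_modify (PySem.Dict.counter E).items (PySem.Dict.counter E).items
        (fun ac cc => PySem.Int.mod (ac.1 - cc.1) p) (fun ac cc => ac.2 * cc.2)]
  rw [wfold_sumsq, wfold_sumsq, SQ_to_PS, SQ_to_PS]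
  rw [PS_flatMap E (fun a b => PySem.Int.mod (a + b) p) (fun _ _ => 1)]
  rw [PySem.Dict.items_counter]
  rw [PS_flatMap ((PySem.Set.ofList E).map (fun k => (k, (E.count k : Int))))
        (fun ac cc => PySem.Int.mod (ac.1 - cc.1) p) (fun ac cc => ac.2 * cc.2)]
  rw [quad_to_finset, quadB_to_finset]
  simp only [mul_ite, mul_zero, mul_one]
  rw [← swap_bcd E.toFinset (fun a b c d =>
    if PySem.Int.mod (a - c) p = PySem.Int.mod (d - b) p then
      ((E.count a : Int) * (E.count c : Int)) * ((E.count d : Int) * (E.count b : Int)) else 0)]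
  refine Finset.sum_congr rfl (fun a _ => ?_)
  refine Finset.sum_congr rfl (fun b _ => ?_)
  refine Finset.sum_congr rfl (fun c _ => ?_)
  refine Finset.sum_congr rfl (fun d _ => ?_)
  by_cases h : PySem.Int.mod (a + b) p = PySem.Int.mod (c + d) p
  · rw [if_pos h, if_pos ((mod_cond p a b c d).mp h)]; ring
  · rw [if_neg h, if_neg (fun hh => h ((mod_cond p a b c d).mpr hh))]
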